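-- pv_equiv track=rewrite | github.com/IdarV/python | twitch_chat/chat_reader.py | get_sender_name
-- ===== SOURCE A (Python) =====
-- def get_sender_name(header):
--     sender = ""
--     for char in header:
--                     if char == "!":
--                         break
--                     if char != ":":
--                         sender += char
--     return sender
-- ===== SOURCE B (Python) =====
-- def get_sender_name(header):
--     return header.partition("!")[0].replace(":", "")
-- ===== Notes on version B (the rewrite author's own statement) =====
-- stated objective: simpler
-- what changed: Replaces the manual character-accumulation loop with break by a slice-then-filter decomposition: take the prefix before the first exclamation mark via partition and delete all colons via replace.
import Mathlib
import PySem

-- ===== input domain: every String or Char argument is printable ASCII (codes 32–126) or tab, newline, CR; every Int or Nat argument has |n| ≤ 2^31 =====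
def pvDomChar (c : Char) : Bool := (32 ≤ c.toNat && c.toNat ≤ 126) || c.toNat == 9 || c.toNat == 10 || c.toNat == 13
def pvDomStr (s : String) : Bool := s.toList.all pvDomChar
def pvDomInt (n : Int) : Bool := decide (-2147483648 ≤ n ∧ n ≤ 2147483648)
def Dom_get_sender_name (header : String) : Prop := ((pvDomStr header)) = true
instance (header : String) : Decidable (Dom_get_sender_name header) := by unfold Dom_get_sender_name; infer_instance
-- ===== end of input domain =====

-- B replaces A's manual accumulate-with-break loop by partition-before-'!' then remove-':' (simpler decomposition).


-- ===== PORT A =====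
-- the for-loop with break, char by char over header, accumulating sender
def pvLoopA : List Char → String → String
  | [], sender => sender
  | c :: rest, sender =>
      if c = '!' then sender
      else if c ≠ ':' then pvLoopA rest (sender.push c)
      else pvLoopA rest sender

def get_sender_name (header : String) : String := pvLoopA header.toList ""

-- ===== PORT B =====
-- header.partition("!")[0] is the prefix before the first '!' = takeWhile (· ≠ '!') (exact: one-char separator);
-- .replace(":", "") with one-char old and empty new deletes every ':' = filter (· ≠ ':') (exact).
def get_sender_name_alt (header : String) : String :=
  String.ofList ((header.toList.takeWhile (· ≠ '!')).filter (· ≠ ':'))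

-- ===== PRECONDITION & SPEC =====
def Spec_get_sender_name (header : String) (out : String) : Prop := out = get_sender_name_alt header
instance (header : String) (out : String) : Decidable (Spec_get_sender_name header out) := by unfold Spec_get_sender_name; infer_instance

-- ===== CLAIM (what is proved, stated in full; the proofs are below) =====
def Claim_equal_get_sender_name : Prop := ∀ (header : String), Dom_get_sender_name header → Spec_get_sender_name header (get_sender_name header)

-- ===== LEMMAS AND PROOFS =====
theorem push_ofList (l : List Char) (c : Char) :
    (String.ofList l).push c = String.ofList (l ++ [c]) := by
  apply String.toList_injective; simp

theorem pvLoopA_eq (cs : List Char) (l : List Char) :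
    pvLoopA cs (String.ofList l) = String.ofList (l ++ (cs.takeWhile (· ≠ '!')).filter (· ≠ ':')) := by
  induction cs generalizing l with
  | nil => simp [pvLoopA]
  | cons c rest ih =>
    by_cases hb : c = '!'
    · simp [pvLoopA, hb]
    · by_cases hc : c = ':'
      · simp [pvLoopA, hc, ih]
      · simpa [pvLoopA, hb, hc, List.takeWhile_cons, List.filter_cons, push_ofList] using ih (l ++ [c])

-- ===== VERDICT (by name: the statement is the Claim_ definition above) =====
theorem get_sender_name_spec : Claim_equal_get_sender_name := by
  intro header _
  show get_sender_name header = get_sender_name_alt header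
  have h := pvLoopA_eq header.toList []
  simpa [get_sender_name, get_sender_name_alt] using h
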